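-- pv_equiv track=rewrite | github.com/madhavjani/NLP | Spelling Corrector/spell_correcter.py | delete_edits
-- ===== SOURCE A (Python) =====
-- def delete_edits(w):
--     range_letters = 'abcdefghijklmnopqrstuvwxyz'
--     split = [(w[:i], w[i:]) for i in range(len(w) + 1)]
--     inserts = [left + center + right for left, right in split for center in range_letters]
--     deletes = [left + right[1:] for left, right in split if right]
--     transposition = [left + right[1] + right[0] + right[2:] for left, right in split if len(right) > 1]
--     substitute = [left + center + right[1:] for left, right in split if right for center in range_letters]
--     return set(inserts + deletes + transposition + substitute)
-- ===== SOURCE B (Python) =====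
-- def delete_edits(w):
--     letters = 'abcdefghijklmnopqrstuvwxyz'
--     # right fold: compute the four edit lists of each suffix of w from those of the
--     # next-shorter suffix, prefixing the dropped character onto the recursive results
--     ins = [c for c in letters]
--     dels, trans, subs = [], [], []
--     suf = ''
--     for k in range(len(w) - 1, -1, -1):
--         ch = w[k]
--         new_suf = ch + suf
--         ins = [c + new_suf for c in letters] + [ch + x for x in ins]
--         dels = [suf] + [ch + x for x in dels]
--         trans = ([suf[0] + ch + suf[1:]] if suf else []) + [ch + x for x in trans]
--         subs = [c + suf for c in letters] + [ch + x for x in subs]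
--         suf = new_suf
--     return set(ins + dels + trans + subs)
-- ===== Notes on version B (the rewrite author's own statement) =====
-- stated objective: alternative
-- what changed: Replaced A's precomputed split list and four comprehension passes over it by a right fold over the word: the four edit lists of each suffix are computed from those of the next-shorter suffix by prefixing the dropped character onto the recursive results, building the output back-to-front with no split enumeration at all.
import Mathlib
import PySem

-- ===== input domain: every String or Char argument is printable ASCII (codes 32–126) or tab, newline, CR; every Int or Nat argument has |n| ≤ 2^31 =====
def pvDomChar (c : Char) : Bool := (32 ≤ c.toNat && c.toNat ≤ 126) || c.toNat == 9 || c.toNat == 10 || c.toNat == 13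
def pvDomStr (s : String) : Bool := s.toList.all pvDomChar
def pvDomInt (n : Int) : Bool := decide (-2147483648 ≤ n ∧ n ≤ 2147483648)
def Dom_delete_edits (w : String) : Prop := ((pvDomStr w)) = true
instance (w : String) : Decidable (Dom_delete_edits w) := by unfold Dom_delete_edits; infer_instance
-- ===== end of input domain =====

-- B drops A's split list and four comprehensions over it: it computes the four edit lists of each
-- suffix of w from those of the next-shorter suffix (a right fold, building the output back-to-front),
-- prefixing the dropped character onto the recursive results (objective: alternative).

def pyLetters : List Char := "abcdefghijklmnopqrstuvwxyz".toList

-- ===== PORT A =====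
def delete_edits (w : String) : List String :=
  let cs := w.toList
  let split : List (List Char × List Char) :=
    (PySem.List.pyRange 0 ((cs.length : Int) + 1) 1).map
      (fun i => (PySem.List.slice cs none (some i), PySem.List.slice cs (some i) none))
  let inserts := split.flatMap (fun p => pyLetters.map (fun c => String.ofList (p.1 ++ [c] ++ p.2)))
  let deletes := (split.filter (fun p => !p.2.isEmpty)).map
      (fun p => String.ofList (p.1 ++ PySem.List.slice p.2 (some 1) none))
  let transposition := (split.filter (fun p => decide (1 < p.2.length))).map
      (fun p => String.ofList (p.1 ++ [PySem.List.pyGetD p.2 1 ' '] ++ [PySem.List.pyGetD p.2 0 ' ']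
                 ++ PySem.List.slice p.2 (some 2) none))
  let substitute := (split.filter (fun p => !p.2.isEmpty)).flatMap
      (fun p => pyLetters.map (fun c => String.ofList (p.1 ++ [c] ++ PySem.List.slice p.2 (some 1) none)))
  (PySem.Set.ofList (inserts ++ deletes ++ transposition ++ substitute) : PySem.Set String)

-- ===== PORT B =====
-- Source B's loop body for one character ch (strings represented as List Char, 'ch + x' ↔ 'ch :: x';
-- they are turned into Strings once, at the end).  State = (suf, ins, dels, trans, subs).
def altStep (ch : Char)
    (st : List Char × List (List Char) × List (List Char) × List (List Char) × List (List Char)) :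
    List Char × List (List Char) × List (List Char) × List (List Char) × List (List Char) :=
  let suf := st.1
  let newSuf := ch :: suf
  (newSuf,
   pyLetters.map (fun c => c :: newSuf) ++ st.2.1.map (fun x => ch :: x),
   suf :: st.2.2.1.map (fun x => ch :: x),
   (match suf with
    | s0 :: srest => [s0 :: ch :: srest]
    | [] => []) ++ st.2.2.2.1.map (fun x => ch :: x),
   pyLetters.map (fun c => c :: suf) ++ st.2.2.2.2.map (fun x => ch :: x))

-- Source B's 'for k in range(len(w)-1, -1, -1)' consuming w[k] is a right fold over the characters
def delete_edits_alt (w : String) : List String :=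
  let st := w.toList.foldr altStep ([], pyLetters.map (fun c => [c]), [], [], [])
  (PySem.Set.ofList ((st.2.1 ++ st.2.2.1 ++ st.2.2.2.1 ++ st.2.2.2.2).map String.ofList) :
    PySem.Set String)

-- ===== PRECONDITION & SPEC =====
def Spec_delete_edits (w : String) (out : List String) : Prop := out = delete_edits_alt w
instance (w : String) (out : List String) : Decidable (Spec_delete_edits w out) := by unfold Spec_delete_edits; infer_instance

-- ===== CLAIM (what is proved, stated in full; the proofs are below) =====
def Claim_equal_delete_edits : Prop := ∀ (w : String), Dom_delete_edits w → Spec_delete_edits w (delete_edits w)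

-- ===== LEMMAS AND PROOFS =====

-- the four suffix-edit lists B's fold maintains, as plain recursions (proof-only helpers)
def insRec : List Char → List (List Char)
  | [] => pyLetters.map (fun c => [c])
  | r0 :: rt => pyLetters.map (fun c => c :: r0 :: rt) ++ (insRec rt).map (fun x => r0 :: x)

def delRec : List Char → List (List Char)
  | [] => []
  | r0 :: rt => rt :: (delRec rt).map (fun x => r0 :: x)

def transRec : List Char → List (List Char)
  | [] => []
  | r0 :: rt =>
      (match rt with
       | s0 :: srest => [s0 :: r0 :: srest]
       | [] => []) ++ (transRec rt).map (fun x => r0 :: x)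

def subRec : List Char → List (List Char)
  | [] => []
  | r0 :: rt => pyLetters.map (fun c => c :: rt) ++ (subRec rt).map (fun x => r0 :: x)

theorem foldr_altStep (cs : List Char) :
    cs.foldr altStep ([], pyLetters.map (fun c => [c]), [], [], [])
      = (cs, insRec cs, delRec cs, transRec cs, subRec cs) := by
  induction cs with
  | nil => simp [insRec, delRec, transRec, subRec]
  | cons r0 rt ih => simp [List.foldr_cons, ih, altStep, insRec, delRec, transRec, subRec]

-- generic: a flatMap over all (prefix, suffix) splits of rest is a structural recursion
def splitsRec (g : List Char → List Char → List String) (pre rest : List Char) : List String :=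
  g pre rest ++ match rest with
    | [] => []
    | r0 :: rt => splitsRec g (pre ++ [r0]) rt

theorem splits_flatMap (g : List Char → List Char → List String) (rest : List Char) :
    ∀ (pre : List Char),
    (List.range (rest.length + 1)).flatMap
        (fun i => g (pre ++ rest.take i) (rest.drop i)) = splitsRec g pre rest := by
  induction rest with
  | nil => intro pre; simp [splitsRec]
  | cons r0 rt ih =>
    intro pre
    rw [show (r0 :: rt).length + 1 = (rt.length + 1) + 1 from by simp]
    rw [List.range_succ_eq_map, List.flatMap_cons, List.flatMap_map]
    have h2 : (fun a => g (pre ++ (r0 :: rt).take a.succ) ((r0 :: rt).drop a.succ))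
          = (fun i => g ((pre ++ [r0]) ++ rt.take i) (rt.drop i)) := by
      funext i; simp
    rw [h2, ih (pre ++ [r0])]
    simp [splitsRec]

-- filter-then-map as a flatMap, to feed splits_flatMap
theorem filter_map_flatMap {α : Type} (q : α → Bool) (f : α → String) (l : List α) :
    (l.filter q).map f = l.flatMap (fun x => if q x then [f x] else []) := by
  induction l with
  | nil => rfl
  | cons x xs ih => by_cases h : q x <;> simp [h, ih]

-- (l.filter q).flatMap f as a flatMap with an if, to feed splits_flatMap
theorem filter_flatMap {α : Type} (q : α → Bool) (f : α → List String) (l : List α) :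
    (l.filter q).flatMap f = l.flatMap (fun x => if q x then f x else []) := by
  induction l with
  | nil => rfl
  | cons x xs ih => by_cases h : q x <;> simp [h, ih]

-- the four instantiations of splitsRec are B's suffix-edit recursions, prefixed with pre
theorem splitsRec_ins (rest : List Char) : ∀ pre,
    splitsRec (fun p s => pyLetters.map (fun c => String.ofList (p ++ [c] ++ s))) pre rest
      = (insRec rest).map (fun l => String.ofList (pre ++ l)) := by
  induction rest with
  | nil => intro pre; simp [splitsRec, insRec]
  | cons r0 rt ih =>
    intro pre
    rw [splitsRec, ih]
    simp [insRec, List.map_map, Function.comp_def, List.append_assoc]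

theorem splitsRec_del (rest : List Char) : ∀ pre,
    splitsRec (fun p s => if !s.isEmpty then [String.ofList (p ++ PySem.List.slice s (some 1) none)] else []) pre rest
      = (delRec rest).map (fun l => String.ofList (pre ++ l)) := by
  induction rest with
  | nil => intro pre; simp [splitsRec, delRec]
  | cons r0 rt ih =>
    intro pre
    rw [splitsRec, ih]
    simp [delRec, PySem.List.slice_from_one, List.map_map, Function.comp_def, List.append_assoc]

theorem splitsRec_trans (rest : List Char) : ∀ pre,
    splitsRec (fun p s => if decide (1 < s.length) then
        [String.ofList (p ++ [PySem.List.pyGetD s 1 ' '] ++ [PySem.List.pyGetD s 0 ' ']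
           ++ PySem.List.slice s (some 2) none)] else []) pre rest
      = (transRec rest).map (fun l => String.ofList (pre ++ l)) := by
  induction rest with
  | nil => intro pre; simp [splitsRec, transRec]
  | cons r0 rt ih =>
    intro pre
    rw [splitsRec, ih]
    cases rt with
    | nil => simp [transRec]
    | cons r1 rt2 =>
      have hg1 : PySem.List.pyGetD (r0 :: r1 :: rt2) 1 ' ' = r1 := by simp [pysem]
      have hg0 : PySem.List.pyGetD (r0 :: r1 :: rt2) 0 ' ' = r0 := by simp [pysem]
      have hs : PySem.List.slice (r0 :: r1 :: rt2) (some 2) none = rt2 := by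
        simpa using PySem.List.slice_from_natCast (r0 :: r1 :: rt2) 2
      simp [transRec, hg1, hg0, hs, List.map_map, Function.comp_def, List.append_assoc]

theorem splitsRec_sub (rest : List Char) : ∀ pre,
    splitsRec (fun p s => if !s.isEmpty then
        pyLetters.map (fun c => String.ofList (p ++ [c] ++ PySem.List.slice s (some 1) none)) else []) pre rest
      = (subRec rest).map (fun l => String.ofList (pre ++ l)) := by
  induction rest with
  | nil => intro pre; simp [splitsRec, subRec]
  | cons r0 rt ih =>
    intro pre
    rw [splitsRec, ih]
    simp [subRec, PySem.List.slice_from_one, List.map_map, Function.comp_def, List.append_assoc]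

-- A's split list in take/drop form (with the empty prefix made explicit for splits_flatMap)
theorem split_norm (cs : List Char) :
    (PySem.List.pyRange 0 ((cs.length : Int) + 1) 1).map
      (fun i => (PySem.List.slice cs none (some i), PySem.List.slice cs (some i) none))
    = (List.range (cs.length + 1)).map (fun i => (([] : List Char) ++ cs.take i, cs.drop i)) := by
  rw [show ((cs.length : Int) + 1) = ((cs.length + 1 : Nat) : Int) from by push_cast; ring]
  rw [PySem.List.pyRange_zero]
  simp [List.map_map, Function.comp_def, PySem.List.slice_to_natCast, PySem.List.slice_from_natCast]

-- ===== VERDICT (by name: the statement is the Claim_ definition above) =====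
theorem delete_edits_spec : Claim_equal_delete_edits := by
  intro w _
  unfold Spec_delete_edits delete_edits delete_edits_alt
  rw [foldr_altStep]
  simp only
  rw [split_norm]
  rw [List.flatMap_map, splits_flatMap
        (fun p s => pyLetters.map (fun c => String.ofList (p ++ [c] ++ s))), splitsRec_ins]
  rw [filter_map_flatMap, List.flatMap_map, splits_flatMap
        (fun p s => if !s.isEmpty then [String.ofList (p ++ PySem.List.slice s (some 1) none)] else []),
      splitsRec_del]
  rw [filter_map_flatMap, List.flatMap_map, splits_flatMap
        (fun p s => if decide (1 < s.length) then
          [String.ofList (p ++ [PySem.List.pyGetD s 1 ' '] ++ [PySem.List.pyGetD s 0 ' ']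
             ++ PySem.List.slice s (some 2) none)] else []),
      splitsRec_trans]
  rw [filter_flatMap, List.flatMap_map, splits_flatMap
        (fun p s => if !s.isEmpty then
          pyLetters.map (fun c => String.ofList (p ++ [c] ++ PySem.List.slice s (some 1) none)) else []),
      splitsRec_sub]
  simp [List.map_append]
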